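-- pv_equiv track=rewrite | github.com/robotools/ufo2fdk | Lib/ufo2fdk/makeotfParts.py | isLegalGlyphName
-- ===== SOURCE A (Python) =====
-- _digits = set("0123456789")
--
-- _validCharacters = set("ABCDEFGHIJKLMNOPQRSTUVWXYZabcdefghijklmnopqrstuvwxyz0123456789_.")
--
-- def isLegalGlyphName(glyphName):
--     """
--     >>> isLegalGlyphName("a")
--     True
--     >>> isLegalGlyphName(".foo")
--     False
--     >>> isLegalGlyphName(".notdef")
--     True
--     >>> isLegalGlyphName("foo.bar")
--     True
--     >>> isLegalGlyphName("1foo")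
--     False
--     >>> isLegalGlyphName("foo1")
--     True
--     >>> isLegalGlyphName("f*o")
--     False
--     >>> isLegalGlyphName("f$o")
--     False
--     >>> isLegalGlyphName("abcdefghijklmnopqrstuvwxyz01234")
--     True
--     >>> isLegalGlyphName("abcdefghijklmnopqrstuvwxyz012345")
--     False
--     """
--     # must not start with a digit or period
--     if glyphName[0] in _digits:
--         return False
--     if glyphName[0] == "." and glyphName != ".notdef":
--         return False
--     # up to 31 characters in length
--     if len(glyphName) > 31:
--         return False
--     # must be entirely comprised of characters from A-Z a-z 0-9 . _
--     for character in glyphName: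
--         if character not in _validCharacters:
--             return False
--     # passed
--     return True
-- ===== SOURCE B (Python) =====
-- # B: single regular-expression validation replacing the three explicit checks
-- # (idiomatic; same return value as A wherever A returns — A raises IndexError on "", which B does not reproduce).
-- import re
--
-- _glyphNameRE = re.compile(r"[A-Za-z_][A-Za-z0-9_.]{0,30}")
--
--
-- def isLegalGlyphName(glyphName):
--     if glyphName == ".notdef":
--         return True
--     return _glyphNameRE.fullmatch(glyphName) is not None
-- ===== Notes on version B (the rewrite author's own statement) =====
-- stated objective: idiomatic
-- what changed: Replaced the three explicit checks and the per-character loop with a single compiled regular expression fullmatch ([A-Za-z_][A-Za-z0-9_.]{0,30}) plus the '.notdef' special case.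
-- outside the precondition, e.g. on isLegalGlyphName(''): A raises IndexError, B returns False
import Mathlib
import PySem

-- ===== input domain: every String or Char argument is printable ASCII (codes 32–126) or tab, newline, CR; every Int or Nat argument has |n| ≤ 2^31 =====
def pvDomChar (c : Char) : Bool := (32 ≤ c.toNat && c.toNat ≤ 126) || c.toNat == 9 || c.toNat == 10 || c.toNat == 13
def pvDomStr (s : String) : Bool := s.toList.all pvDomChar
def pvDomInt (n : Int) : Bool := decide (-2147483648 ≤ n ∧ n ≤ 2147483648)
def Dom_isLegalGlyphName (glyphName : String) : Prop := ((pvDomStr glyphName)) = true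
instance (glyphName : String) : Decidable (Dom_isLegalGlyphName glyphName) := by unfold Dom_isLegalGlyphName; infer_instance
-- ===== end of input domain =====

-- B replaces A's three explicit checks and per-character loop with one regular-expression
-- fullmatch ([A-Za-z_][A-Za-z0-9_.]{0,30}) plus the '.notdef' special case (idiomatic; same values).


-- ===== PORT A =====
def pvDigits : List Char := "0123456789".toList

def pvValidCharacters : List Char :=
  "ABCDEFGHIJKLMNOPQRSTUVWXYZabcdefghijklmnopqrstuvwxyz0123456789_.".toList

-- the 'for character in glyphName: if character not in _validCharacters: return False' loop
def pvCharLoop : List Char → Bool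
  | [] => true
  | c :: rest => if ¬ (pvValidCharacters.contains c) then false else pvCharLoop rest

def isLegalGlyphName (glyphName : String) : Bool :=
  match PySem.Str.pyGet? glyphName 0 with
  | none => false  -- glyphName[0] raises IndexError on ""; excluded by Pre_
  | some c0 =>
    if pvDigits.contains c0 then false
    else if c0 = '.' ∧ glyphName ≠ ".notdef" then false
    else if PySem.Str.len glyphName > 31 then false
    else pvCharLoop glyphName.toList

-- ===== PORT B =====
-- character class [A-Za-z_]
def pvHeadClass (c : Char) : Bool := ('A' ≤ c && c ≤ 'Z') || ('a' ≤ c && c ≤ 'z') || c == '_'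

-- character class [A-Za-z0-9_.]
def pvTailClass (c : Char) : Bool :=
  ('A' ≤ c && c ≤ 'Z') || ('a' ≤ c && c ≤ 'z') || ('0' ≤ c && c ≤ '9') || c == '_' || c == '.'

-- re.fullmatch(r"[A-Za-z_][A-Za-z0-9_.]{0,30}", glyphName) is not None:
-- one head-class character followed by 0 to 30 tail-class characters, consuming the whole string
def isLegalGlyphName_alt (glyphName : String) : Bool :=
  if glyphName = ".notdef" then true
  else
    match glyphName.toList with
    | [] => false
    | c :: rest => pvHeadClass c && rest.length ≤ 30 && rest.all pvTailClass

-- ===== PRECONDITION & SPEC =====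
-- Pre_ excludes only the empty string, on which A raises IndexError (glyphName[0]).
def Pre_isLegalGlyphName (glyphName : String) : Prop := glyphName ≠ ""
instance (glyphName : String) : Decidable (Pre_isLegalGlyphName glyphName) := by
  unfold Pre_isLegalGlyphName; infer_instance

def pvWitness_isLegalGlyphName : String := "a"

def Spec_isLegalGlyphName (glyphName : String) (out : Bool) : Prop := out = isLegalGlyphName_alt glyphName
instance (glyphName : String) (out : Bool) : Decidable (Spec_isLegalGlyphName glyphName out) := by unfold Spec_isLegalGlyphName; infer_instance

-- ===== CLAIM (what is proved, stated in full; the proofs are below) =====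
def Claim_equal_isLegalGlyphName : Prop := ∀ (glyphName : String), Dom_isLegalGlyphName glyphName → Pre_isLegalGlyphName glyphName → Spec_isLegalGlyphName glyphName (isLegalGlyphName glyphName)

-- ===== LEMMAS AND PROOFS =====

theorem pvChar_toNat_inj : Function.Injective Char.toNat :=
  fun _ _ h => Char.ext (UInt32.toNat_inj.mp h)

theorem pvMem_map_toNat (c : Char) (l : List Char) : c ∈ l ↔ c.toNat ∈ l.map Char.toNat :=
  ⟨List.mem_map_of_mem, fun h => by
    obtain ⟨d, hd, he⟩ := List.mem_map.mp h
    exact (pvChar_toNat_inj he.symm) ▸ hd⟩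

set_option maxRecDepth 4096 in
theorem pvDigits_contains (c : Char) :
    pvDigits.contains c = true ↔ 48 ≤ c.toNat ∧ c.toNat ≤ 57 := by
  rw [List.contains_iff_mem, pvMem_map_toNat]
  have h : pvDigits.map Char.toNat = [48,49,50,51,52,53,54,55,56,57] := by decide
  rw [h]; simp only [List.mem_cons, List.not_mem_nil, or_false]; omega

set_option maxRecDepth 8192 in
theorem pvValid_contains (c : Char) :
    pvValidCharacters.contains c = true ↔
      (65 ≤ c.toNat ∧ c.toNat ≤ 90) ∨ (97 ≤ c.toNat ∧ c.toNat ≤ 122) ∨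
      (48 ≤ c.toNat ∧ c.toNat ≤ 57) ∨ c.toNat = 95 ∨ c.toNat = 46 := by
  rw [List.contains_iff_mem, pvMem_map_toNat]
  have h : pvValidCharacters.map Char.toNat =
      [65,66,67,68,69,70,71,72,73,74,75,76,77,78,79,80,81,82,83,84,85,86,87,88,89,90,
       97,98,99,100,101,102,103,104,105,106,107,108,109,110,111,112,113,114,115,116,117,118,119,120,121,122,
       48,49,50,51,52,53,54,55,56,57,95,46] := by decide
  rw [h]; simp only [List.mem_cons, List.not_mem_nil, or_false]; omega

theorem pvHeadClass_iff (c : Char) :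
    pvHeadClass c = true ↔
      (65 ≤ c.toNat ∧ c.toNat ≤ 90) ∨ (97 ≤ c.toNat ∧ c.toNat ≤ 122) ∨ c.toNat = 95 := by
  have h95 : (c == '_') = true ↔ c.toNat = 95 :=
    ⟨fun h => by rw [beq_iff_eq.mp h]; rfl, fun h => beq_iff_eq.mpr (pvChar_toNat_inj h)⟩
  simp only [pvHeadClass, Bool.or_eq_true, Bool.and_eq_true, decide_eq_true_eq,
    Char.le_def, UInt32.le_iff_toNat_le, h95]
  have : ('A').val.toNat = 65 ∧ ('Z').val.toNat = 90 ∧ ('a').val.toNat = 97 ∧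
      ('z').val.toNat = 122 := by decide
  rw [this.1, this.2.1, this.2.2.1, this.2.2.2]
  unfold Char.toNat
  tauto

theorem pvTailClass_iff (c : Char) :
    pvTailClass c = true ↔
      (65 ≤ c.toNat ∧ c.toNat ≤ 90) ∨ (97 ≤ c.toNat ∧ c.toNat ≤ 122) ∨
      (48 ≤ c.toNat ∧ c.toNat ≤ 57) ∨ c.toNat = 95 ∨ c.toNat = 46 := by
  have h95 : (c == '_') = true ↔ c.toNat = 95 :=
    ⟨fun h => by rw [beq_iff_eq.mp h]; rfl, fun h => beq_iff_eq.mpr (pvChar_toNat_inj h)⟩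
  have h46 : (c == '.') = true ↔ c.toNat = 46 :=
    ⟨fun h => by rw [beq_iff_eq.mp h]; rfl, fun h => beq_iff_eq.mpr (pvChar_toNat_inj h)⟩
  simp only [pvTailClass, Bool.or_eq_true, Bool.and_eq_true, decide_eq_true_eq,
    Char.le_def, UInt32.le_iff_toNat_le, h95, h46]
  have : ('A').val.toNat = 65 ∧ ('Z').val.toNat = 90 ∧ ('a').val.toNat = 97 ∧
      ('z').val.toNat = 122 ∧ ('0').val.toNat = 48 ∧ ('9').val.toNat = 57 := by decide
  rw [this.1, this.2.1, this.2.2.1, this.2.2.2.1, this.2.2.2.2.1, this.2.2.2.2.2]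
  unfold Char.toNat
  tauto

theorem pvCharLoop_eq_all (l : List Char) : pvCharLoop l = l.all (pvValidCharacters.contains ·) := by
  induction l with
  | nil => rfl
  | cons c rest ih =>
    simp only [pvCharLoop, List.all_cons, ih]
    cases h : pvValidCharacters.contains c <;> simp [h]

theorem pvDot_iff (c : Char) : c = '.' ↔ c.toNat = 46 :=
  ⟨fun h => by rw [h]; rfl, fun h => pvChar_toNat_inj h⟩

theorem isLegalGlyphName_spec : Claim_equal_isLegalGlyphName := by
  intro g _ hpre
  unfold Spec_isLegalGlyphName
  by_cases hnd : g = ".notdef"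
  · subst hnd; decide
  · have hne : g.toList ≠ [] := by simpa [String.toList_eq_nil_iff] using hpre
    obtain ⟨c, rest, hl⟩ : ∃ c rest, g.toList = c :: rest := by
      cases h : g.toList with
      | nil => exact absurd h hne
      | cons c rest => exact ⟨c, rest, rfl⟩
    unfold isLegalGlyphName isLegalGlyphName_alt
    rw [if_neg hnd]
    have hget : PySem.Str.pyGet? g 0 = some c := by
      simp [PySem.Str.pyGet?, hl]
    rw [hget, hl]
    dsimp only
    have hlen : PySem.Str.len g = ((rest.length + 1 : Nat) : Int) := by
      simp [PySem.Str.len_eq, hl]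
    rw [hlen, pvCharLoop_eq_all]
    by_cases hd : pvDigits.contains c = true
    · -- first char is a digit: A returns false, B's head class fails
      rw [if_pos hd]
      have := (pvDigits_contains c).mp hd
      have hh : pvHeadClass c = false := by
        rw [← Bool.not_eq_true, pvHeadClass_iff]; omega
      simp [hh]
    · rw [if_neg hd]
      have hd' := fun h => hd ((pvDigits_contains c).mpr h)
      by_cases hdot : c = '.'
      · rw [if_pos ⟨hdot, hnd⟩]
        have h46 := (pvDot_iff c).mp hdot
        have hh : pvHeadClass c = false := by
          rw [← Bool.not_eq_true, pvHeadClass_iff]; omega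
        simp [hh]
      · rw [if_neg (fun h => hdot h.1)]
        have h46 := fun h => hdot ((pvDot_iff c).mpr h)
        by_cases hlen31 : ((rest.length + 1 : Nat) : Int) > 31
        · rw [if_pos hlen31]
          have : ¬ (rest.length ≤ 30) := by omega
          simp [this]
        · rw [if_neg hlen31]
          have hlen30 : rest.length ≤ 30 := by omega
          simp only [List.all_cons, hlen30, decide_true]
          have hD : ¬ (48 ≤ c.toNat ∧ c.toNat ≤ 57) := hd'
          have h46' : c.toNat ≠ 46 := h46
          have hpt : ∀ x, pvValidCharacters.contains x = pvTailClass x := fun x => by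
            rw [Bool.eq_iff_iff, pvValid_contains, pvTailClass_iff]
          have hth : pvTailClass c = pvHeadClass c := by
            rw [Bool.eq_iff_iff, pvTailClass_iff, pvHeadClass_iff]; omega
          simp only [hpt, hth, Bool.and_true]
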